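-- pv_equiv track=rewrite | github.com/jgingh7/Problem-Solving-Python | Inter/DRW2.py | solution
-- ===== SOURCE A (Python) =====
-- from collections import defaultdict
--
-- def solution(A):
--     # write your code in Python 3.6
--     idxDict = defaultdict(list)
--     for i in range(len(A)):
--         idxDict[A[i]].append(i) #keys are the values, values are indices
--
--     ans = -1
--     A.sort()
--     if len(A) <= 1:
--         return ans
--
--     hasAdj = 0
--     for i in range(len(A) - 1):
--         if A[i] != A[i + 1]:
--             hasAdj += 1
--             if hasAdj == 1:
--                 ans = makeShortest(idxDict[A[i]], idxDict[A[i + 1]])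
--             else:
--                 ans = min(ans, makeShortest(idxDict[A[i]], idxDict[A[i + 1]]))
--
--     return ans
--
-- def makeShortest (list1, list2):
--     ans = abs(list1[0] - list2[0])
--     for k in range(len(list1)):
--         for l in range(len(list2)):
--             ans = min(ans, abs(list1[k] - list2[l]))
--     return ans
-- ===== SOURCE B (Python) =====
-- def solution(A):
--     # Group indices by value, then for each adjacent pair of sorted distinct
--     # values compute the min index distance with a two-pointer merge.
--     # (Note: the original sorts A in place; equivalence is about the return value.)
--     idx = {}
--     for i, v in enumerate(A):
--         idx.setdefault(v, []).append(i)
--     vals = sorted(idx)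
--     best = -1
--     for v, w in zip(vals, vals[1:]):
--         d = closest(idx[v], idx[w])
--         if best < 0 or d < best:
--             best = d
--     return best
--
-- def closest(xs, ys):
--     # min |x - y| over two sorted lists, O(len(xs)+len(ys))
--     best = abs(xs[0] - ys[0])
--     i = j = 0
--     while i < len(xs) and j < len(ys):
--         d = abs(xs[i] - ys[j])
--         if d < best:
--             best = d
--         if xs[i] < ys[j]:
--             i += 1
--         else:
--             j += 1
--     return best
-- ===== Notes on version B (the rewrite author's own statement) =====
-- stated objective: faster
-- what changed: Replaces the per-pair brute-force double loop over index lists (makeShortest) and the scan over the sorted full array with grouping indices once, sorting only the distinct values, and a two-pointer merge over each adjacent pair of sorted index lists.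
import Mathlib
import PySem

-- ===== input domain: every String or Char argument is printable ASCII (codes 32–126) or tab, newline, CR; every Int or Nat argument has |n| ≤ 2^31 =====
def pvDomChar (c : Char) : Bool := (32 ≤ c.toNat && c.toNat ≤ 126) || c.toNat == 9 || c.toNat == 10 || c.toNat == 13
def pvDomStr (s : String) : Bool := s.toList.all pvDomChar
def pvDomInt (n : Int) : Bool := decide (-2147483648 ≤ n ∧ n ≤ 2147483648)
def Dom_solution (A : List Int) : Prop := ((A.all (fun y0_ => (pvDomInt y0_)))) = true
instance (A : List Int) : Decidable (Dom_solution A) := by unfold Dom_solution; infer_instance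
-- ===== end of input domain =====

-- B replaces A's per-pair brute-force double loop and full-array scan by grouping indices
-- once and a two-pointer merge per adjacent pair of sorted distinct values (faster, O(n log n)).
-- Python A sorts its argument in place (B does not); the equivalence is about the return value.

-- ===== PORT A =====
-- list1[0] / list2[0]: every call from `solution` passes nonempty lists, where
-- `pyGetD · 0 0` is exactly Python's `[0]`.
def makeShortest (list1 list2 : List Int) : Int :=
  let ans : Int := |PySem.List.pyGetD list1 0 0 - PySem.List.pyGetD list2 0 0|
  (PySem.List.pyRange 0 (PySem.List.len list1)).foldl (fun ans k =>
    (PySem.List.pyRange 0 (PySem.List.len list2)).foldl (fun ans l =>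
      min ans |PySem.List.pyGetD list1 k 0 - PySem.List.pyGetD list2 l 0|) ans) ans

def solution (A : List Int) : Int :=
  let idxDict := (PySem.List.pyRange 0 (PySem.List.len A)).foldl
      (fun d i => d.modify (PySem.List.pyGetD A i 0) [] (fun l => l ++ [i]))
      (PySem.Dict.empty : PySem.Dict Int (List Int))
  let ans : Int := -1
  let S := PySem.List.sorted A (fun x => x)   -- A.sort()
  if PySem.List.len S ≤ 1 then ans
  else
    ((PySem.List.pyRange 0 (PySem.List.len S - 1)).foldl
      (fun (st : Int × Int) i =>
        if PySem.List.pyGetD S i 0 ≠ PySem.List.pyGetD S (i + 1) 0 then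
          ((if st.2 + 1 = 1 then
              makeShortest (idxDict.getD (PySem.List.pyGetD S i 0) [])
                           (idxDict.getD (PySem.List.pyGetD S (i + 1) 0) [])
            else
              min st.1 (makeShortest (idxDict.getD (PySem.List.pyGetD S i 0) [])
                                     (idxDict.getD (PySem.List.pyGetD S (i + 1) 0) []))),
           st.2 + 1)
        else st)
      (ans, 0)).1

-- ===== PORT B =====
-- the while loop of Source B's `closest` (two pointers = the two list suffixes)
def closestGo : List Int → List Int → Int → Int
  | x :: xs, y :: ys, best =>
      let d := |x - y|
      let best := if d < best then d else best
      if x < y then closestGo xs (y :: ys) best else closestGo (x :: xs) ys best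
  | _, _, best => best
termination_by xs ys _ => xs.length + ys.length

-- xs[0] / ys[0]: every call from `solution_alt` passes nonempty lists, where
-- `pyGetD · 0 0` is exactly Python's `[0]`.
def closest (xs ys : List Int) : Int :=
  closestGo xs ys |PySem.List.pyGetD xs 0 0 - PySem.List.pyGetD ys 0 0|

def solution_alt (A : List Int) : Int :=
  let idx := (PySem.List.enumerate A).foldl
      (fun d (p : Int × Int) => d.modify p.2 [] (fun l => l ++ [p.1]))
      (PySem.Dict.empty : PySem.Dict Int (List Int))
  let vals := PySem.List.sorted idx.keys (fun x => x)
  (vals.zip (vals.drop 1)).foldl            -- zip(vals, vals[1:])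
    (fun best p =>
      let d := closest (idx.getD p.1 []) (idx.getD p.2 [])
      if best < 0 ∨ d < best then d else best)
    (-1)

-- ===== PRECONDITION & SPEC =====
def Spec_solution (A : List Int) (out : Int) : Prop := out = solution_alt A
instance (A : List Int) (out : Int) : Decidable (Spec_solution A out) := by unfold Spec_solution; infer_instance

-- ===== CLAIM (what is proved, stated in full; the proofs are below) =====
def Claim_equal_solution : Prop := ∀ (A : List Int), Dom_solution A → Spec_solution A (solution A)

-- ===== LEMMAS AND PROOFS =====

-- all pairwise distances |x - y|
def pm (xs ys : List Int) : List Int := xs.flatMap (fun x => ys.map (fun y => |x - y|))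

-- the common value of makeShortest / closest
def mS (xs ys : List Int) : Int :=
  (pm xs ys).foldl min |PySem.List.pyGetD xs 0 0 - PySem.List.pyGetD ys 0 0|

-- (value, index) pairs of A in order
def epairs (A : List Int) : List (Int × Int) :=
  (PySem.List.enumerate A).map (fun p => (p.2, p.1))

def dictOf (A : List Int) : PySem.Dict Int (List Int) :=
  (epairs A).foldl (fun d p => d.modify p.1 [] (fun l => l ++ [p.2])) PySem.Dict.empty

def idxs (A : List Int) (v : Int) : List Int :=
  ((epairs A).filter (fun p => p.1 == v)).map (fun p => p.2)

-- adjacent dedup ("destutter") of a list, given its head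
def dd : Int → List Int → List Int
  | a, [] => [a]
  | a, b :: t => if a = b then dd a t else a :: dd b t

-- minimal distance between index lists of the two values of a pair
def G (A : List Int) (p : Int × Int) : Int := mS (idxs A p.1) (idxs A p.2)

-- canonical result: min of F over the pair list, -1 when empty
def canon (F : Int × Int → Int) : List (Int × Int) → Int
  | [] => -1
  | p :: t => t.foldl (fun b q => min b (F q)) (F p)

lemma foldl_min_ge (l : List Int) (b : Int) (h : ∀ x ∈ l, b ≤ x) : l.foldl min b = b := by
  induction l with
  | nil => rfl
  | cons x t ih =>
      simp only [List.foldl_cons, min_eq_left (h x (by simp))]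
      exact ih fun y hy => h y (by simp [hy])

lemma foldl_min_head (l : List Int) (a b : Int) (h : ∀ x ∈ l, a ≤ x) :
    (a :: l).foldl min b = min b a := by
  simp only [List.foldl_cons]
  exact foldl_min_ge l (min b a) fun x hx => le_trans (min_le_right _ _) (h x hx)

lemma pm_nil_right (xs : List Int) : pm xs [] = [] := by
  simp [pm]

lemma pm_cons (x : Int) (xs ys : List Int) :
    pm (x :: xs) ys = ys.map (fun y => |x - y|) ++ pm xs ys := by
  simp [pm]

lemma pm_col (xs : List Int) (y : Int) (ys : List Int) :
    (pm xs (y :: ys)).Perm (xs.map (fun x => |x - y|) ++ pm xs ys) := by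
  induction xs with
  | nil => simp [pm]
  | cons x xs ih =>
      rw [pm_cons, pm_cons]
      simp only [List.map_cons, List.map_cons, List.cons_append]
      refine List.Perm.cons _ ((List.Perm.append_left _ ih).trans ?_)
      rw [← List.append_assoc, ← List.append_assoc]
      exact List.Perm.append_right _ List.perm_append_comm

lemma foldl_min_perm {l l' : List Int} (h : l.Perm l') (b : Int) :
    l.foldl min b = l'.foldl min b :=
  List.Perm.foldl_eq (rcomm := ⟨fun b a a' => min_right_comm b a a'⟩) h b

-- two-pointer merge computes the fold-min of all pairwise distances (sorted inputs)
lemma closestGo_eq_aux (n : Nat) : ∀ (xs ys : List Int) (b : Int),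
    xs.length + ys.length ≤ n → xs.Pairwise (· ≤ ·) → ys.Pairwise (· ≤ ·) →
    closestGo xs ys b = (pm xs ys).foldl min b := by
  induction n with
  | zero =>
      intro xs ys b hlen _ _
      have hx : xs = [] := by cases xs <;> simp_all
      subst hx
      simp [closestGo, pm]
  | succ n ih =>
      intro xs ys b hlen hx hy
      match xs, ys with
      | [], ys => simp [closestGo, pm]
      | x :: xs, [] => simp [closestGo, pm_nil_right]
      | x :: xs, y :: ys =>
          rw [closestGo]
          have hmin : (if |x - y| < b then |x - y| else b) = min b |x - y| := by
            rw [min_def]; split_ifs <;> omega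
          simp only [hmin]
          by_cases hxy : x < y
          · rw [if_pos hxy]
            rw [ih xs (y :: ys) (min b |x - y|) (by simp at hlen ⊢; omega) hx.of_cons hy]
            rw [pm_cons, List.foldl_append]
            congr 1
            simp only [List.map_cons]
            rw [foldl_min_head]
            intro z hz
            simp only [List.mem_map] at hz
            obtain ⟨y', hy', rfl⟩ := hz
            have h1 : y ≤ y' := List.rel_of_pairwise_cons hy hy'
            have h2 : |x - y| = y - x := by rw [abs_of_nonpos (by omega)]; ring
            have h3 : |x - y'| = y' - x := by rw [abs_of_nonpos (by omega)]; ring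
            omega
          · rw [if_neg hxy]
            rw [ih (x :: xs) ys (min b |x - y|) (by simp at hlen ⊢; omega) hx hy.of_cons]
            rw [foldl_min_perm (pm_col (x :: xs) y ys)]
            rw [List.foldl_append]
            congr 1
            simp only [List.map_cons]
            rw [foldl_min_head]
            intro z hz
            simp only [List.mem_map] at hz
            obtain ⟨x', hx', rfl⟩ := hz
            have h1 : x ≤ x' := List.rel_of_pairwise_cons hx hx'
            have h2 : |x - y| = x - y := by rw [abs_of_nonneg (by omega)]
            have h3 : |x' - y| = x' - y := by rw [abs_of_nonneg (by omega)]
            omega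

lemma closestGo_eq (xs ys : List Int) (b : Int)
    (hx : xs.Pairwise (· ≤ ·)) (hy : ys.Pairwise (· ≤ ·)) :
    closestGo xs ys b = (pm xs ys).foldl min b :=
  closestGo_eq_aux (xs.length + ys.length) xs ys b le_rfl hx hy

lemma nested_fold (xs ys : List Int) (s : Int) :
    xs.foldl (fun a x => ys.foldl (fun a y => min a |x - y|) a) s = (pm xs ys).foldl min s := by
  induction xs generalizing s with
  | nil => rfl
  | cons x xs ih =>
      rw [List.foldl_cons, pm_cons, List.foldl_append, ih]
      congr 1
      rw [List.foldl_map]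

lemma makeShortest_eq (xs ys : List Int) : makeShortest xs ys = mS xs ys := by
  unfold makeShortest mS
  have hin : ∀ (acc x : Int),
      (PySem.List.pyRange 0 (PySem.List.len ys)).foldl
        (fun a l => min a |x - PySem.List.pyGetD ys l 0|) acc
      = ys.foldl (fun a y => min a |x - y|) acc := by
    intro acc x
    have h := PySem.List.foldl_pyRange_pyGetD ys 0 (fun a y => min a |x - y|) acc
      (a := 0) le_rfl
    simpa using h
  have hout := PySem.List.foldl_pyRange_pyGetD xs 0
      (fun acc x => ys.foldl (fun a y => min a |x - y|) acc)
      |PySem.List.pyGetD xs 0 0 - PySem.List.pyGetD ys 0 0| (a := 0) le_rfl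
  simp only [Int.toNat_zero, List.drop_zero] at hout
  rw [show (fun (ans : Int) k =>
      (PySem.List.pyRange 0 (PySem.List.len ys)).foldl
        (fun ans l => min ans |PySem.List.pyGetD xs k 0 - PySem.List.pyGetD ys l 0|) ans)
      = (fun (ans : Int) k =>
        ys.foldl (fun a y => min a |PySem.List.pyGetD xs k 0 - y|) ans) from
      funext fun acc => funext fun k => hin acc _]
  rw [hout, nested_fold]

lemma closest_eq (xs ys : List Int)
    (hx : xs.Pairwise (· ≤ ·)) (hy : ys.Pairwise (· ≤ ·)) : closest xs ys = mS xs ys := by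
  unfold closest mS
  exact closestGo_eq xs ys _ hx hy

lemma foldl_min_nonneg (l : List Int) (b : Int) (hb : 0 ≤ b) (h : ∀ x ∈ l, 0 ≤ x) :
    0 ≤ l.foldl min b := by
  induction l generalizing b with
  | nil => exact hb
  | cons x t ih =>
      exact ih _ (le_min hb (h x (by simp))) (fun y hy => h y (by simp [hy]))

lemma mS_nonneg (xs ys : List Int) : 0 ≤ mS xs ys := by
  unfold mS
  refine foldl_min_nonneg _ _ (abs_nonneg _) ?_
  intro z hz
  simp only [pm, List.mem_flatMap, List.mem_map] at hz
  obtain ⟨x, _, y, _, rfl⟩ := hz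
  exact abs_nonneg _

-- ==== the dictionary ====

lemma enumerate_cons (a : Int) (t : List Int) (k : Int) :
    PySem.List.enumerate (a :: t) k = (k, a) :: PySem.List.enumerate t (k + 1) := rfl

lemma enum_snd (A : List Int) : ∀ (k : Int), (PySem.List.enumerate A k).map (fun p => p.2) = A := by
  induction A with
  | nil => intro k; rfl
  | cons a t ih => intro k; rw [enumerate_cons, List.map_cons, ih (k + 1)]

lemma epairs_map_fst (A : List Int) : (epairs A).map (fun p => p.1) = A := by
  unfold epairs
  rw [List.map_map]
  exact enum_snd A 0

lemma er (A : List Int) : ∀ (k : Int),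
    (List.range A.length).map (fun i : Nat => (PySem.List.pyGetD A ↑i 0, (↑i + k : Int)))
      = (PySem.List.enumerate A k).map (fun p => (p.2, p.1)) := by
  induction A with
  | nil => intro k; rfl
  | cons a t ih =>
      intro k
      rw [List.length_cons, List.range_succ_eq_map, List.map_cons, List.map_map,
        enumerate_cons, List.map_cons]
      congr 1
      · rw [PySem.List.pyGetD_natCast]
        simp
      · rw [← ih (k + 1)]
        refine List.map_congr_left ?_
        intro i _
        simp only [Function.comp_apply]
        have h1 : ((↑(Nat.succ i) : Int)) = ↑i + 1 := by push_cast; ring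
        rw [h1]
        have h2 : PySem.List.pyGetD (a :: t) (↑i + 1) 0 = PySem.List.pyGetD t ↑i 0 := by
          have h : (↑i + 1 : Int) = ↑(i + 1) := by push_cast; ring
          rw [h, PySem.List.pyGetD_natCast, PySem.List.pyGetD_natCast, List.getD_cons_succ]
        rw [h2]
        simp only [Prod.mk.injEq, true_and]
        ring

lemma er0 (A : List Int) :
    (List.range A.length).map (fun i : Nat => (PySem.List.pyGetD A ↑i 0, (↑i : Int)))
      = epairs A := by
  unfold epairs
  rw [← er A 0]
  refine List.map_congr_left ?_
  intro i _
  simp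

lemma dictA_eq (A : List Int) :
    (PySem.List.pyRange 0 (PySem.List.len A)).foldl
      (fun d i => d.modify (PySem.List.pyGetD A i 0) [] (fun l => l ++ [i]))
      (PySem.Dict.empty : PySem.Dict Int (List Int)) = dictOf A := by
  unfold dictOf
  rw [show PySem.List.len A = (↑A.length : Int) from rfl, PySem.List.pyRange_zero_natCast,
    List.foldl_map, ← er0 A, List.foldl_map]

lemma dictB_eq (A : List Int) :
    (PySem.List.enumerate A).foldl
      (fun d (p : Int × Int) => d.modify p.2 [] (fun l => l ++ [p.1]))
      (PySem.Dict.empty : PySem.Dict Int (List Int)) = dictOf A := by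
  unfold dictOf epairs
  rw [List.foldl_map]

lemma getD_dictOf (A : List Int) (v : Int) : (dictOf A).getD v [] = idxs A v := by
  unfold dictOf idxs
  rw [PySem.Dict.getD_foldl_modify_append]
  simp [PySem.Dict.getD_empty]

lemma keys_dictOf (A : List Int) : (dictOf A).keys = PySem.Set.ofList A := by
  unfold dictOf
  rw [PySem.Dict.keys_foldl_modify_key (epairs A) (fun p => p.1) []
    (fun _ p => (fun l => l ++ [p.2])) PySem.Dict.empty]
  rw [PySem.Dict.keys_empty, epairs_map_fst]
  rfl

lemma enum_lb (A : List Int) : ∀ (k : Int), ∀ p ∈ PySem.List.enumerate A k, k ≤ p.1 := by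
  induction A with
  | nil => intro k p hp; simp [PySem.List.enumerate] at hp
  | cons a t ih =>
      intro k p hp
      rw [enumerate_cons] at hp
      rcases List.mem_cons.1 hp with rfl | hp'
      · simp
      · have := ih (k + 1) p hp'; omega

lemma enum_pairwise (A : List Int) : ∀ (k : Int),
    (PySem.List.enumerate A k).Pairwise (fun p q => p.1 < q.1) := by
  induction A with
  | nil => intro k; simp [PySem.List.enumerate]
  | cons a t ih =>
      intro k
      rw [enumerate_cons]
      refine List.Pairwise.cons ?_ (ih (k + 1))
      intro q hq
      have := enum_lb t (k + 1) q hq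
      simp only
      omega

lemma idxs_sorted (A : List Int) (v : Int) : (idxs A v).Pairwise (· ≤ ·) := by
  unfold idxs epairs
  have h1 : (PySem.List.enumerate A 0).Pairwise (fun p q => p.1 < q.1) := enum_pairwise A 0
  have h2 : ((PySem.List.enumerate A 0).map (fun p => (p.2, p.1))).Pairwise
      (fun p q : Int × Int => p.2 < q.2) := by
    rw [List.pairwise_map]
    exact h1
  have h3 : (((PySem.List.enumerate A).map (fun p => (p.2, p.1))).filter
      (fun p => p.1 == v)).Pairwise (fun p q : Int × Int => p.2 < q.2) :=
    List.Pairwise.sublist List.filter_sublist h2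
  rw [List.pairwise_map]
  exact h3.imp (fun h => le_of_lt h)

-- ==== sorted scan vs distinct values ====

lemma adjHelper (t : List Int) : ∀ (a : Int),
    (List.range t.length).map
      (fun k : Nat => (PySem.List.pyGetD (a :: t) ↑k 0, PySem.List.pyGetD (a :: t) (↑k + 1) 0))
      = (a :: t).zip t := by
  induction t with
  | nil => intro a; rfl
  | cons b t ih =>
      intro a
      rw [List.length_cons, List.range_succ_eq_map, List.map_cons, List.map_map]
      have hz : (a :: b :: t).zip (b :: t) = (a, b) :: (b :: t).zip t := rfl
      rw [hz]
      congr 1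
      · simp only [Nat.cast_zero, zero_add]
        rw [PySem.List.pyGetD_ofNat', PySem.List.pyGetD_ofNat']
        rfl
      · rw [← ih b]
        refine List.map_congr_left ?_
        intro k _
        simp only [Function.comp_apply]
        have hs : ((Nat.succ k : Nat) : Int) = ↑k + 1 := by push_cast; ring
        rw [hs]
        have g1 : PySem.List.pyGetD (a :: b :: t) (↑k + 1) 0 = PySem.List.pyGetD (b :: t) ↑k 0 := by
          have h : (↑k + 1 : Int) = ↑(k + 1) := by push_cast; ring
          rw [h, PySem.List.pyGetD_natCast, PySem.List.pyGetD_natCast, List.getD_cons_succ]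
        have g2 : PySem.List.pyGetD (a :: b :: t) (↑k + 1 + 1) 0
            = PySem.List.pyGetD (b :: t) (↑k + 1) 0 := by
          have h : (↑k + 1 + 1 : Int) = ↑(k + 2) := by push_cast; ring
          have h' : (↑k + 1 : Int) = ↑(k + 1) := by push_cast; ring
          rw [h, h', PySem.List.pyGetD_natCast, PySem.List.pyGetD_natCast, List.getD_cons_succ]
        rw [g1, g2]

lemma zipAdj (l : List Int) :
    (PySem.List.pyRange 0 (PySem.List.len l - 1)).map
      (fun i => (PySem.List.pyGetD l i 0, PySem.List.pyGetD l (i + 1) 0)) = l.zip l.tail := by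
  match l with
  | [] => decide
  | a :: t =>
      have hlen : PySem.List.len (a :: t) - 1 = (↑t.length : Int) := by
        rw [show PySem.List.len (a :: t) = (↑(a :: t).length : Int) from rfl]
        simp
      rw [hlen, PySem.List.pyRange_zero_natCast, List.map_map]
      show (List.range t.length).map
        (fun k : Nat => (PySem.List.pyGetD (a :: t) ↑k 0, PySem.List.pyGetD (a :: t) (↑k + 1) 0))
        = (a :: t).zip (a :: t).tail
      rw [adjHelper t a]
      rfl

lemma dd_head (a : Int) (t : List Int) : ∃ r, dd a t = a :: r := by
  induction t generalizing a with
  | nil => exact ⟨[], rfl⟩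
  | cons b t ih =>
      by_cases h : a = b
      · subst h
        simpa [dd] using ih a
      · exact ⟨dd b t, by simp [dd, h]⟩

lemma filter_zip_dd (t : List Int) : ∀ (a : Int),
    ((a :: t).zip t).filter (fun p => decide (p.1 ≠ p.2)) = (dd a t).zip (dd a t).tail := by
  induction t with
  | nil => intro a; rfl
  | cons b t ih =>
      intro a
      by_cases h : a = b
      · subst h
        show List.filter _ ((a, a) :: (a :: t).zip t) = _
        rw [List.filter_cons, if_neg (by simp), ih a,
          show dd a (a :: t) = dd a t from by simp [dd]]
      · show List.filter _ ((a, b) :: (b :: t).zip t) = _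
        rw [List.filter_cons, if_pos (by simp [h]), ih b,
          show dd a (b :: t) = a :: dd b t from by simp [dd, h]]
        obtain ⟨r, hr⟩ := dd_head b t
        rw [hr]
        rfl

lemma dd_sublist (a : Int) (t : List Int) : (dd a t).Sublist (a :: t) := by
  induction t generalizing a with
  | nil => simp [dd]
  | cons b t ih =>
      by_cases h : a = b
      · subst h
        rw [show dd a (a :: t) = dd a t from by simp [dd]]
        exact (ih a).trans (by simp)
      · rw [show dd a (b :: t) = a :: dd b t from by simp [dd, h]]
        exact List.Sublist.cons₂ a (ih b)

lemma mem_dd (t : List Int) : ∀ (a x : Int), x ∈ a :: t → x ∈ dd a t := by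
  induction t with
  | nil => intro a x hx; simpa [dd] using hx
  | cons b t ih =>
      intro a x hx
      by_cases h : a = b
      · subst h
        rw [show dd a (a :: t) = dd a t from by simp [dd]]
        apply ih
        simpa using hx
      · rw [show dd a (b :: t) = a :: dd b t from by simp [dd, h]]
        rcases List.mem_cons.1 hx with rfl | hx'
        · exact List.mem_cons_self
        · exact List.mem_cons_of_mem _ (ih b x hx')

lemma dd_pairwise_lt (t : List Int) : ∀ (a : Int), (a :: t).Pairwise (· ≤ ·) →
    (dd a t).Pairwise (· < ·) := by
  induction t with
  | nil => intro a _; simp [dd]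
  | cons b t ih =>
      intro a h
      have hab : a ≤ b := List.rel_of_pairwise_cons h (by simp)
      have hbt : (b :: t).Pairwise (· ≤ ·) := h.of_cons
      by_cases hcase : a = b
      · subst hcase
        rw [show dd a (a :: t) = dd a t from by simp [dd]]
        apply ih
        refine List.Pairwise.cons ?_ hbt.of_cons
        intro x hx
        exact List.rel_of_pairwise_cons hbt hx
      · rw [show dd a (b :: t) = a :: dd b t from by simp [dd, hcase]]
        refine List.Pairwise.cons ?_ (ih b hbt)
        intro x hx
        have hx' : x ∈ b :: t := (dd_sublist b t).subset hx
        have halt : a < b := lt_of_le_of_ne hab hcase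
        rcases List.mem_cons.1 hx' with rfl | hx''
        · exact halt
        · exact lt_of_lt_of_le halt (List.rel_of_pairwise_cons hbt hx'')

-- ==== the two accumulation loops ====

lemma foldA (F : Int × Int → Int) (t : List (Int × Int)) : ∀ (a : Int) (c : Int), 1 ≤ c →
    (t.foldl (fun (st : Int × Int) p =>
        ((if st.2 + 1 = 1 then F p else min st.1 (F p)), st.2 + 1)) (a, c)).1
      = t.foldl (fun b q => min b (F q)) a := by
  induction t with
  | nil => intro a c _; rfl
  | cons p t ih =>
      intro a c hc
      rw [List.foldl_cons, List.foldl_cons]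
      show (t.foldl _ ((if c + 1 = 1 then F p else min a (F p)), c + 1)).1 = _
      rw [if_neg (by omega)]
      exact ih (min a (F p)) (c + 1) (by omega)

lemma foldB (F : Int × Int → Int) (hF : ∀ p, 0 ≤ F p) (t : List (Int × Int)) : ∀ (a : Int),
    0 ≤ a →
    t.foldl (fun b p => if b < 0 ∨ F p < b then F p else b) a
      = t.foldl (fun b q => min b (F q)) a := by
  induction t with
  | nil => intro a _; rfl
  | cons p t ih =>
      intro a ha
      rw [List.foldl_cons, List.foldl_cons]
      have h1 : (if a < 0 ∨ F p < a then F p else a) = min a (F p) := by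
        rw [min_def]; split_ifs <;> omega
      rw [h1]
      exact ih (min a (F p)) (le_min ha (hF p))

lemma loopA_eq_canon (F : Int × Int → Int) (L : List (Int × Int)) :
    (L.foldl (fun (st : Int × Int) p =>
        ((if st.2 + 1 = 1 then F p else min st.1 (F p)), st.2 + 1)) (-1, 0)).1 = canon F L := by
  match L with
  | [] => rfl
  | p :: t =>
      rw [List.foldl_cons]
      show (t.foldl _ ((if (0:Int) + 1 = 1 then F p else min (-1) (F p)), (0:Int) + 1)).1 = _
      rw [if_pos (by norm_num)]
      exact foldA F t (F p) (0 + 1) (by norm_num)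

lemma loopB_eq_canon (F : Int × Int → Int) (hF : ∀ p, 0 ≤ F p) (L : List (Int × Int)) :
    L.foldl (fun b p => if b < 0 ∨ F p < b then F p else b) (-1) = canon F L := by
  match L with
  | [] => rfl
  | p :: t =>
      rw [List.foldl_cons]
      rw [if_pos (Or.inl (by norm_num))]
      exact foldB F hF t (F p) (hF p)

-- ==== assembling the two sides ====

-- the deduplicated sorted list
def ddl : List Int → List Int
  | [] => []
  | a :: t => dd a t

lemma ddl_pairwise_lt (l : List Int) (h : l.Pairwise (· ≤ ·)) : (ddl l).Pairwise (· < ·) := by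
  match l with
  | [] => simp [ddl]
  | a :: t => exact dd_pairwise_lt t a h

lemma mem_ddl (l : List Int) (x : Int) : x ∈ ddl l ↔ x ∈ l := by
  match l with
  | [] => simp [ddl]
  | a :: t =>
      constructor
      · intro hx; exact (dd_sublist a t).subset hx
      · intro hx; exact mem_dd t a x hx

lemma sorted_set_eq_ddl (A : List Int) :
    PySem.List.sorted (PySem.Set.ofList A) (fun x => x)
      = ddl (PySem.List.sorted A (fun x => x)) := by
  set S := PySem.List.sorted A (fun x => x) with hS
  have hSp : S.Pairwise (· ≤ ·) := PySem.List.sorted_pairwise A (fun x => x)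
  have hW : (ddl S).Pairwise (· < ·) := ddl_pairwise_lt S hSp
  have hWn : (ddl S).Nodup := List.Pairwise.imp (fun h => ne_of_lt h) hW
  have hVp := PySem.List.sorted_pairwise (PySem.Set.ofList A) (fun x => x)
  have hVperm := PySem.List.sorted_perm (PySem.Set.ofList A) (fun x => x) false
  have hVn : (PySem.List.sorted (PySem.Set.ofList A) (fun x => x)).Nodup :=
    hVperm.nodup_iff.2 (PySem.Set.nodup_ofList A)
  have hmem : ∀ x, x ∈ PySem.List.sorted (PySem.Set.ofList A) (fun x => x) ↔ x ∈ ddl S := by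
    intro x
    rw [hVperm.mem_iff, PySem.Set.mem_ofList, mem_ddl]
    rw [(PySem.List.sorted_perm A (fun x => x) false).mem_iff]
  have hperm : (PySem.List.sorted (PySem.Set.ofList A) (fun x => x)).Perm (ddl S) :=
    (List.perm_ext_iff_of_nodup hVn hWn).2 hmem
  exact PySem.List.eq_of_perm_of_pairwise_le_of_injective (fun x => x)
    (fun a b h => h) hperm hVp (hW.imp (fun h => le_of_lt h))

lemma canon_short (F : Int × Int → Int) (S : List Int) (h : S.length ≤ 1) :
    canon F ((ddl S).zip (ddl S).tail) = -1 := by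
  match S, h with
  | [], _ => rfl
  | [a], _ => rfl
  | a :: b :: t, h => simp at h

lemma solA_eq (A : List Int) :
    solution A = canon (G A)
      ((ddl (PySem.List.sorted A (fun x => x))).zip
        (ddl (PySem.List.sorted A (fun x => x))).tail) := by
  simp only [solution]
  rw [dictA_eq]
  generalize PySem.List.sorted A (fun x => x) = S
  by_cases hlen : PySem.List.len S ≤ 1
  · rw [if_pos hlen]
    refine (canon_short (G A) S ?_).symm
    have h' : (↑S.length : Int) ≤ 1 := hlen
    exact_mod_cast h'
  · rw [if_neg hlen]
    have hconv : (PySem.List.pyRange 0 (PySem.List.len S - 1)).foldl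
        (fun (st : Int × Int) i =>
          if PySem.List.pyGetD S i 0 ≠ PySem.List.pyGetD S (i + 1) 0 then
            ((if st.2 + 1 = 1 then
                makeShortest ((dictOf A).getD (PySem.List.pyGetD S i 0) [])
                             ((dictOf A).getD (PySem.List.pyGetD S (i + 1) 0) [])
              else
                min st.1 (makeShortest ((dictOf A).getD (PySem.List.pyGetD S i 0) [])
                                       ((dictOf A).getD (PySem.List.pyGetD S (i + 1) 0) []))),
             st.2 + 1)
          else st) ((-1 : Int), (0 : Int))
        = (S.zip S.tail).foldl
        (fun (st : Int × Int) (p : Int × Int) =>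
          if p.1 ≠ p.2 then
            ((if st.2 + 1 = 1 then
                makeShortest ((dictOf A).getD p.1 []) ((dictOf A).getD p.2 [])
              else
                min st.1 (makeShortest ((dictOf A).getD p.1 []) ((dictOf A).getD p.2 []))),
             st.2 + 1)
          else st) ((-1 : Int), (0 : Int)) := by
      rw [← zipAdj S, List.foldl_map]
    rw [hconv]
    have hbody : (fun (st : Int × Int) (p : Int × Int) =>
        if p.1 ≠ p.2 then
          ((if st.2 + 1 = 1 then
              makeShortest ((dictOf A).getD p.1 []) ((dictOf A).getD p.2 [])
            else
              min st.1 (makeShortest ((dictOf A).getD p.1 []) ((dictOf A).getD p.2 []))),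
           st.2 + 1)
        else st)
        = (fun (st : Int × Int) (p : Int × Int) =>
          if p.1 ≠ p.2 then ((if st.2 + 1 = 1 then G A p else min st.1 (G A p)), st.2 + 1)
          else st) := by
      funext st p
      rw [getD_dictOf, getD_dictOf, makeShortest_eq]
      rfl
    rw [hbody]
    rw [PySem.List.foldl_ite_eq_foldl_filter (fun p : Int × Int => p.1 ≠ p.2)
      (fun (st : Int × Int) (p : Int × Int) =>
        ((if st.2 + 1 = 1 then G A p else min st.1 (G A p)), st.2 + 1))]
    obtain ⟨a, t, rfl⟩ : ∃ a t, S = a :: t := by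
      cases S with
      | nil => exact absurd (by decide) hlen
      | cons a t => exact ⟨a, t, rfl⟩
    rw [List.tail_cons, filter_zip_dd t a]
    exact loopA_eq_canon (G A) _

lemma solB_eq (A : List Int) :
    solution_alt A = canon (G A)
      ((ddl (PySem.List.sorted A (fun x => x))).zip
        (ddl (PySem.List.sorted A (fun x => x))).tail) := by
  simp only [solution_alt]
  rw [dictB_eq, keys_dictOf, sorted_set_eq_ddl, List.drop_one]
  have hbody : (fun (best : Int) (p : Int × Int) =>
      if best < 0 ∨ closest ((dictOf A).getD p.1 []) ((dictOf A).getD p.2 []) < best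
      then closest ((dictOf A).getD p.1 []) ((dictOf A).getD p.2 []) else best)
      = (fun (best : Int) (p : Int × Int) =>
        if best < 0 ∨ G A p < best then G A p else best) := by
    funext best p
    rw [getD_dictOf, getD_dictOf, closest_eq _ _ (idxs_sorted A p.1) (idxs_sorted A p.2)]
    rfl
  rw [hbody]
  exact loopB_eq_canon (G A) (fun p => mS_nonneg _ _) _

-- ===== VERDICT (by name: the statement is the Claim_ definition above) =====
theorem solution_spec : Claim_equal_solution := by
  intro A _
  unfold Spec_solution
  rw [solA_eq, solB_eq]
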